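-- pv_equiv track=rewrite | github.com/LuciusSchoenbaum/pypinnch | pypinnch/_impl/types.py | indexlist_to_gaps
-- ===== SOURCE A (Python) =====
-- def indexlist_to_gaps(indexlist):
--     gaps = []
--     beg = indexlist[0]
--     succ = beg+1
--     i = 1
--     while i < len(indexlist):
--         midx = indexlist[i]
--         if midx == succ:
--             # gap ontinues
--             succ += 1
--         else:
--             gaps.append((beg, succ))
--             # next gap starts at midx
--             beg = midx
--             succ = beg+1
--         i += 1
--     # the last gap
--     gaps.append((beg, succ))
--     return gaps
-- ===== SOURCE B (Python) =====
-- def indexlist_to_gaps(indexlist):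
--     pairs = list(zip(indexlist, indexlist[1:]))
--     starts = [indexlist[0]] + [b for a, b in pairs if b != a + 1]
--     ends = [a + 1 for a, b in pairs if b != a + 1] + [indexlist[-1] + 1]
--     return list(zip(starts, ends))
-- ===== Notes on version B (the rewrite author's own statement) =====
-- stated objective: idiomatic
-- what changed: Replaces A's while-loop state machine (running successor counter, branch-based run closing) by zipping the list with its shift to get adjacent pairs, building the run starts and run ends as two comprehensions over the break pairs, and zipping them together.
-- outside the precondition, e.g. on indexlist_to_gaps([]): A raises IndexError, B raises IndexError
import Mathlib
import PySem

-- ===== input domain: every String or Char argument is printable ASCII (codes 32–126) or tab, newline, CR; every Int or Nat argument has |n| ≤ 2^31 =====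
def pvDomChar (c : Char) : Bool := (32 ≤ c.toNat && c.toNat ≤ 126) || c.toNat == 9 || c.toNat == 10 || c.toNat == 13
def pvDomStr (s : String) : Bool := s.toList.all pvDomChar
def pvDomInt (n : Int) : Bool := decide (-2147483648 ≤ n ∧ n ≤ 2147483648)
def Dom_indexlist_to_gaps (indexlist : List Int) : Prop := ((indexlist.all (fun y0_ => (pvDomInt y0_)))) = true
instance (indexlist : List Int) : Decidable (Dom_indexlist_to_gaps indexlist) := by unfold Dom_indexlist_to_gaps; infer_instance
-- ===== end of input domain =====

-- B builds the ranges by zipping the list with its shift and pairing break starts with break ends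
-- (idiomatic, no explicit state machine); A and B agree on every nonempty list (both raise IndexError on []).


-- ===== PORT A =====
-- A's while loop over i = 1 .. len-1 reading indexlist[i], with state (gaps, beg, succ),
-- transliterated as structural recursion over the tail of the list carrying the same state.
def pvALoop (rest : List Int) (gaps : List (Int × Int)) (beg succ : Int) : List (Int × Int) :=
  match rest with
  | [] => gaps ++ [(beg, succ)]
  | midx :: rs =>
      if midx = succ then pvALoop rs gaps beg (succ + 1)
      else pvALoop rs (gaps ++ [(beg, succ)]) midx (midx + 1)

def indexlist_to_gaps (indexlist : List Int) : List (Int × Int) :=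
  match indexlist with
  | [] => []  -- unreachable under Pre_: Python raises IndexError at indexlist[0]
  | x :: rest => pvALoop rest [] x (x + 1)

-- ===== PORT B =====
-- Source B: pairs = zip(l, l[1:]); starts = [l[0]] + [b for a,b in pairs if b != a+1];
-- ends = [a+1 for a,b in pairs if b != a+1] + [l[-1]+1]; return zip(starts, ends).
-- The pyGetD defaults are never used under Pre_ (nonempty list; on [] Python raises IndexError).
def indexlist_to_gaps_alt (indexlist : List Int) : List (Int × Int) :=
  let pairs := indexlist.zip (PySem.List.slice indexlist (some 1) none)
  let starts := PySem.List.pyGetD indexlist 0 0 ::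
    (pairs.filter (fun p => decide (p.2 ≠ p.1 + 1))).map (fun p => p.2)
  let ends := (pairs.filter (fun p => decide (p.2 ≠ p.1 + 1))).map (fun p => p.1 + 1) ++
    [PySem.List.pyGetD indexlist (-1) 0 + 1]
  starts.zip ends

-- ===== PRECONDITION & SPEC =====
-- Pre_: the list is nonempty; on [] both Pythons raise IndexError (indexlist[0]).
def Pre_indexlist_to_gaps (indexlist : List Int) : Prop := indexlist ≠ []
instance (indexlist : List Int) : Decidable (Pre_indexlist_to_gaps indexlist) := by unfold Pre_indexlist_to_gaps; infer_instance
def pvWitness_indexlist_to_gaps : List Int := [1, 2, 5]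

def Spec_indexlist_to_gaps (indexlist : List Int) (out : List (Int × Int)) : Prop := out = indexlist_to_gaps_alt indexlist
instance (indexlist : List Int) (out : List (Int × Int)) : Decidable (Spec_indexlist_to_gaps indexlist out) := by unfold Spec_indexlist_to_gaps; infer_instance

-- ===== CLAIM (what is proved, stated in full; the proofs are below) =====
def Claim_equal_indexlist_to_gaps : Prop := ∀ (indexlist : List Int), Dom_indexlist_to_gaps indexlist → Pre_indexlist_to_gaps indexlist → Spec_indexlist_to_gaps indexlist (indexlist_to_gaps indexlist)

-- ===== LEMMAS AND PROOFS =====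

-- Reference recursion: A's loop with the accumulator stripped off.
def pvExt (beg succ : Int) (rest : List Int) : List (Int × Int) :=
  match rest with
  | [] => [(beg, succ)]
  | m :: rs => if m = succ then pvExt beg (succ + 1) rs else (beg, succ) :: pvExt m (m + 1) rs

theorem pvALoop_eq_ext (rest : List Int) (gaps : List (Int × Int)) (beg succ : Int) :
    pvALoop rest gaps beg succ = gaps ++ pvExt beg succ rest := by
  induction rest generalizing gaps beg succ with
  | nil => simp [pvALoop, pvExt]
  | cons m rs ih =>
      simp only [pvALoop, pvExt]
      split_ifs with h
      · exact ih gaps beg (succ + 1)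
      · rw [ih (gaps ++ [(beg, succ)]) m (m + 1)]; simp

-- pvExt's head has first component beg, and its end/tail do not depend on beg.
theorem pvExt_shape (rest : List Int) (succ : Int) :
    ∃ e t, ∀ b, pvExt b succ rest = (b, e) :: t := by
  induction rest generalizing succ with
  | nil => exact ⟨succ, [], fun b => rfl⟩
  | cons m rs ih =>
      by_cases h : m = succ
      · obtain ⟨e, t, he⟩ := ih (succ + 1)
        exact ⟨e, t, fun b => by simp [pvExt, h, he b]⟩
      · exact ⟨succ, pvExt m (m + 1) rs, fun b => by simp [pvExt, h]⟩

-- Zipping against a nonempty list: only the first component of the head changes with the head of the left list.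
theorem pv_zip_swap_head (a b : Int) (s : List Int) (E : List Int) (hE : E ≠ []) :
    (a :: s).zip E = (a, ((b :: s).zip E).headI.2) :: s.zip E.tail := by
  cases E with
  | nil => exact absurd rfl hE
  | cons e E' => simp [List.zip_cons_cons]

-- One cons step of B, expressed in terms of B on the tail.
theorem pvAlt_cons (x y : Int) (rs : List Int) :
    indexlist_to_gaps_alt (x :: y :: rs) =
      if y = x + 1 then
        (x, (indexlist_to_gaps_alt (y :: rs)).headI.2) :: (indexlist_to_gaps_alt (y :: rs)).tail
      else (x, x + 1) :: indexlist_to_gaps_alt (y :: rs) := by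
  have hlast : PySem.List.pyGetD (x :: y :: rs) (-1) 0 = PySem.List.pyGetD (y :: rs) (-1) 0 := by
    simp [PySem.List.pyGetD_neg_one, List.getLast_cons]
  simp only [indexlist_to_gaps_alt, PySem.List.slice_from_one, List.tail_cons,
    PySem.List.pyGetD_zero_cons, hlast, List.zip_cons_cons, List.filter_cons]
  by_cases h : y = x + 1
  · subst h
    rw [if_pos rfl]
    norm_num
    refine pv_zip_swap_head x (x + 1) _ _ ?_
    simp
  · rw [if_neg h]
    simp [h]

-- B computes pvExt on nonempty lists.
theorem pvAlt_eq_ext (rest : List Int) (x : Int) :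
    indexlist_to_gaps_alt (x :: rest) = pvExt x (x + 1) rest := by
  induction rest generalizing x with
  | nil => simp [indexlist_to_gaps_alt, pvExt, PySem.List.slice_from_one,
      PySem.List.pyGetD_zero_cons, PySem.List.pyGetD_neg_one]
  | cons y rs ih =>
      rw [pvAlt_cons, ih y]
      by_cases h : y = x + 1
      · subst h
        obtain ⟨e, t, he⟩ := pvExt_shape rs (x + 1 + 1)
        rw [if_pos rfl, he (x + 1)]
        simp only [List.headI, List.tail_cons]
        simp [pvExt, he x]
      · rw [if_neg h]
        simp [pvExt, h]

-- ===== VERDICT (by name: the statement is the Claim_ definition above) =====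
theorem indexlist_to_gaps_spec : Claim_equal_indexlist_to_gaps := by
  intro l _ hpre
  unfold Spec_indexlist_to_gaps
  match l with
  | [] => exact absurd rfl hpre
  | x :: rest =>
      rw [pvAlt_eq_ext, indexlist_to_gaps, pvALoop_eq_ext]
      simp
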